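-- pv_equiv track=rewrite | github.com/Lukk17/HA-Zigbee-Migration-Tool | ha_zigbee_migration_tool/src/sql/sqlite_adapter.py | _extract_latest_table_name
-- ===== SOURCE A (Python) =====
-- from typing import List, Dict, Any
--
-- def _extract_latest_table_name(tables: List[str], base_name: str) -> str:
--     versions = []
--     for table in tables:
--         try:
--             version_str = table.split('_v')[-1]
--             versions.append((int(version_str), table))
--         except (ValueError, IndexError):
--             continue
--
--     if not versions:
--         return base_name
--
--     return max(versions, key=lambda x: x[0])[1]
-- ===== SOURCE B (Python) =====
-- def _parse_version(table):
--     try: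
--         return int(table.split('_v')[-1])
--     except ValueError:
--         return None
--
--
-- def _extract_latest_table_name(tables, base_name):
--     pairs = [(v, t) for t in tables if (v := _parse_version(t)) is not None]
--     if not pairs:
--         return base_name
--     return sorted(pairs, key=lambda p: p[0], reverse=True)[0][1]
-- ===== Notes on version B (the rewrite author's own statement) =====
-- stated objective: alternative
-- what changed: B parses versions with a small helper inside a filtered comprehension instead of A's try/except accumulator loop, then finds the latest table via a stable descending sort and its first element instead of a max() scan.
import Mathlib
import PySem

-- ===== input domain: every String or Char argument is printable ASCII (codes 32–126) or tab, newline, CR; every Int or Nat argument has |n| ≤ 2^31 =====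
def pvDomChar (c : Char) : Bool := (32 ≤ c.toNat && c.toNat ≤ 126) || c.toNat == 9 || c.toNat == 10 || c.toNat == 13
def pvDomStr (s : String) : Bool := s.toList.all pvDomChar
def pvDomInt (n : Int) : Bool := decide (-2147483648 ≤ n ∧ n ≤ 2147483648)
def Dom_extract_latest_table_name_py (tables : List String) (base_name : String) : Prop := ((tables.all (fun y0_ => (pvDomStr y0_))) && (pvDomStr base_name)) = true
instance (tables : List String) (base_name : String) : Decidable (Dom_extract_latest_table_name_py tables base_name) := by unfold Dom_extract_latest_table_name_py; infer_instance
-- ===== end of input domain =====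

-- B replaces A's accumulator loop + max() scan by a filtered comprehension over a parse
-- helper followed by a stable descending sort, taking the first element (alternative
-- decomposition; not claimed faster).

-- ===== PORT A =====
-- versions accumulator loop; table.split('_v')[-1] → pyGet? (-1) (none = continue,
-- matching the except clause), int(...) → ofStr? (none = ValueError = continue).
-- 'if not versions: return base_name' and then max(...): max? is none exactly on [].
def extract_latest_table_name_py (tables : List String) (base_name : String) : String :=
  let versions := tables.foldl (fun acc table =>
    match PySem.Str.split? table "_v" with    -- none impossible: sep "_v" ≠ ""
    | none => acc
    | some parts =>
      match PySem.List.pyGet? parts (-1) with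
      | none => acc
      | some version_str =>
        match PySem.Int.ofStr? version_str with
        | none => acc
        | some n => acc ++ [(n, table)]) []
  match PySem.List.max? versions (fun x => x.1) with
  | none => base_name
  | some m => m.2

-- ===== PORT B =====
-- _parse_version helper: int(table.split('_v')[-1]) or None
def pvParseVersion (table : String) : Option Int :=
  match PySem.Str.split? table "_v" with    -- none impossible: sep "_v" ≠ ""
  | none => none
  | some parts =>
    match PySem.List.pyGet? parts (-1) with
    | none => none
    | some s => PySem.Int.ofStr? s

-- comprehension with filter, then sorted(pairs, key=fst, reverse=True)[0][1]
-- (the [] branch of the match is unreachable: sorted of a nonempty list is nonempty)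
def extract_latest_table_name_py_alt (tables : List String) (base_name : String) : String :=
  let pairs := tables.filterMap (fun t => (pvParseVersion t).map (fun v => (v, t)))
  if pairs.isEmpty then base_name
  else
    match PySem.List.sorted pairs (fun p => p.1) true with
    | [] => base_name
    | m :: _ => m.2

-- ===== PRECONDITION & SPEC =====
def Spec_extract_latest_table_name_py (tables : List String) (base_name : String) (out : String) : Prop := out = extract_latest_table_name_py_alt tables base_name
instance (tables : List String) (base_name : String) (out : String) : Decidable (Spec_extract_latest_table_name_py tables base_name out) := by unfold Spec_extract_latest_table_name_py; infer_instance

-- ===== CLAIM (what is proved, stated in full; the proofs are below) =====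
def Claim_equal_extract_latest_table_name_py : Prop := ∀ (tables : List String) (base_name : String), Dom_extract_latest_table_name_py tables base_name → Spec_extract_latest_table_name_py tables base_name (extract_latest_table_name_py tables base_name)

-- ===== LEMMAS AND PROOFS =====

-- head of insertBy with the descending comparator = running-max step
theorem pv_head_insertBy {α : Type} (key : α → Int) (x : α) (acc : List α) :
    (PySem.List.insertBy (fun a b => decide (key b < key a)) x acc).head? =
      some (match acc.head? with
            | none => x
            | some h => if key h < key x then x else h) := by
  cases acc with
  | nil => rfl
  | cons y ys =>
    simp only [PySem.List.insertBy, List.head?]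
    by_cases h : key y < key x <;> simp [h]

-- head of the insertion-sort fold = the max? running fold
theorem pv_head_foldl_insertBy {α : Type} (key : α → Int) (xs : List α) : ∀ acc : List α,
    (List.foldl (fun acc x => PySem.List.insertBy (fun a b => decide (key b < key a)) x acc) acc xs).head?
      = List.foldl (fun m x =>
          match m with
          | none => some x
          | some m => if key m < key x then some x else some m) acc.head? xs := by
  induction xs with
  | nil => intro acc; rfl
  | cons x t ih =>
    intro acc
    simp only [List.foldl_cons]
    rw [ih, pv_head_insertBy]
    congr 1
    cases acc.head? with
    | none => rfl
    | some h => by_cases hc : key h < key x <;> simp [hc]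

-- head of the stable descending sort is max?'s first-maximal element
theorem pv_sorted_rev_head {α : Type} (key : α → Int) (xs : List α) :
    (PySem.List.sorted xs key true).head? = PySem.List.max? xs key := by
  rw [PySem.List.sorted_rev_eq_foldl_insertBy]
  simpa [PySem.List.max?] using pv_head_foldl_insertBy key xs []

-- A's accumulator loop builds exactly B's filterMap list
theorem pv_foldl_parse (xs : List String) : ∀ acc : List (Int × String),
    xs.foldl (fun acc table =>
      match PySem.Str.split? table "_v" with
      | none => acc
      | some parts =>
        match PySem.List.pyGet? parts (-1) with
        | none => acc
        | some version_str =>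
          match PySem.Int.ofStr? version_str with
          | none => acc
          | some n => acc ++ [(n, table)]) acc
      = acc ++ xs.filterMap (fun t => (pvParseVersion t).map (fun v => (v, t))) := by
  induction xs with
  | nil => intro acc; simp
  | cons x t ih =>
    intro acc
    have hstep : ∀ acc' : List (Int × String),
        (match PySem.Str.split? x "_v" with
         | none => acc'
         | some parts =>
           match PySem.List.pyGet? parts (-1) with
           | none => acc'
           | some version_str =>
             match PySem.Int.ofStr? version_str with
             | none => acc'
             | some n => acc' ++ [(n, x)])
          = acc' ++ ((pvParseVersion x).map (fun v => (v, x))).toList := by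
      intro acc'
      unfold pvParseVersion
      cases hs2 : PySem.Str.split? x "_v" with
      | none => simp [hs2]
      | some parts =>
        cases hg : PySem.List.pyGet? parts (-1) with
        | none => simp [hg]
        | some s =>
          cases hi : PySem.Int.ofStr? s with
          | none => simp [hg, hi]
          | some n => simp [hg, hi]
    simp only [List.foldl_cons, List.filterMap_cons]
    rw [hstep, ih]
    cases pvParseVersion x <;> simp

-- ===== VERDICT (by name: the statement is the Claim_ definition above) =====
theorem extract_latest_table_name_py_spec : Claim_equal_extract_latest_table_name_py := by
  intro tables base_name _
  unfold Spec_extract_latest_table_name_py extract_latest_table_name_py extract_latest_table_name_py_alt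
  rw [pv_foldl_parse tables []]
  simp only [List.nil_append]
  set pairs := tables.filterMap (fun t => (pvParseVersion t).map (fun v => (v, t))) with hp
  cases hm : PySem.List.max? pairs (fun x => x.1) with
  | none =>
    have : pairs = [] := (PySem.List.max?_eq_none_iff _ _).mp hm
    simp [this]
  | some m =>
    have hne : pairs ≠ [] := by
      intro h; rw [h] at hm; simp [PySem.List.max?] at hm
    have hhead : (PySem.List.sorted pairs (fun p => p.1) true).head? = some m := by
      rw [pv_sorted_rev_head]; exact hm
    have hempty : pairs.isEmpty = false := by
      simpa [List.isEmpty_iff] using hne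
    cases hs : PySem.List.sorted pairs (fun p => p.1) true with
    | nil => rw [hs] at hhead; simp at hhead
    | cons h t =>
      rw [hs] at hhead
      simp only [List.head?] at hhead
      simp [hempty, (Option.some.injEq _ _).mp hhead]
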